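-- pv_equiv track=rewrite | github.com/elwlwlwk/GeneSeq2Taxonomy | extract_z_feature.py | calc_z_curve
-- ===== SOURCE A (Python) =====
-- def calc_z_curve(sequence):
-- 	An=Gn=Cn=Tn=0
-- 	xn=[]
-- 	yn=[]
-- 	zn=[]
-- 	for base in sequence:
-- 		An=Gn=Cn=Tn=0
-- 		if base=="A":
-- 			An=1
-- 		elif base=="T":
-- 			Tn=1
-- 		elif base=="G":
-- 			Gn=1
-- 		elif base=="C":
-- 			Cn=1
-- 		xn.append(An+Gn-Cn-Tn)
-- 		yn.append(An+Cn-Gn-Tn)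
-- 		zn.append(An+Tn-Cn-Gn)
-- 	return [xn , yn, zn]
-- ===== SOURCE B (Python) =====
-- def calc_z_curve(sequence):
--     # Three independent passes: each Z-curve coordinate is the membership sign
--     # (base in positive-set) - (base in negative-set), with AG/CT, AC/GT, AT/GC.
--     return [[(base in pos) - (base in neg) for base in sequence]
--             for pos, neg in (("AG", "CT"), ("AC", "GT"), ("AT", "GC"))]
-- ===== Notes on version B (the rewrite author's own statement) =====
-- stated objective: alternative
-- what changed: Replaces A's single pass maintaining four reset counters and three growing lists by three independent passes, one per coordinate, each computing a sign directly from set membership ((base in pos) - (base in neg)) with no counters or shared state.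
import Mathlib
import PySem

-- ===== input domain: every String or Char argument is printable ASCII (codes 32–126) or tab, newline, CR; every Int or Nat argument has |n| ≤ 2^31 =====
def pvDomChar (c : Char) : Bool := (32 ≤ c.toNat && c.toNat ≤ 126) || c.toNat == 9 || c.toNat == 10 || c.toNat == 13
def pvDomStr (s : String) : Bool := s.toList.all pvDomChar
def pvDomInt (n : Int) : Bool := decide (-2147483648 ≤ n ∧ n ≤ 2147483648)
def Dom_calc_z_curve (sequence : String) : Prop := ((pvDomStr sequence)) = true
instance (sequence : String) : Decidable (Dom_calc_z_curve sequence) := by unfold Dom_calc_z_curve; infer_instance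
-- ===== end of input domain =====

-- B replaces A's single counter-reset pass by three independent membership-sign passes (alternative decomposition, same cost).

-- ===== PORT A =====
-- A's loop: per base reset An..Tn, set one to 1 by the if/elif chain, append the three sums.
def calc_z_curve_step (acc : List Int × List Int × List Int) (base : Char) :
    List Int × List Int × List Int :=
  let An : Int := if base = 'A' then 1 else 0
  let Tn : Int := if base = 'A' then 0 else if base = 'T' then 1 else 0
  let Gn : Int := if base = 'A' ∨ base = 'T' then 0 else if base = 'G' then 1 else 0
  let Cn : Int := if base = 'A' ∨ base = 'T' ∨ base = 'G' then 0 else if base = 'C' then 1 else 0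
  (acc.1 ++ [An + Gn - Cn - Tn], acc.2.1 ++ [An + Cn - Gn - Tn], acc.2.2 ++ [An + Tn - Cn - Gn])

def calc_z_curve (sequence : String) : List (List Int) :=
  let r := sequence.toList.foldl calc_z_curve_step ([], [], [])
  [r.1, r.2.1, r.2.2]

-- ===== PORT B =====
-- one coordinate's value for one base: (base in pos) - (base in neg)
def calc_z_curve_sign (pn : String × String) (base : Char) : Int :=
  (if base ∈ pn.1.toList then 1 else 0) - (if base ∈ pn.2.toList then 1 else 0)

def calc_z_curve_alt (sequence : String) : List (List Int) :=
  [("AG", "CT"), ("AC", "GT"), ("AT", "GC")].map fun pn =>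
    sequence.toList.map (calc_z_curve_sign pn)

-- ===== PRECONDITION & SPEC =====
def Spec_calc_z_curve (sequence : String) (out : List (List Int)) : Prop := out = calc_z_curve_alt sequence
instance (sequence : String) (out : List (List Int)) : Decidable (Spec_calc_z_curve sequence out) := by unfold Spec_calc_z_curve; infer_instance

-- ===== CLAIM (what is proved, stated in full; the proofs are below) =====
def Claim_equal_calc_z_curve : Prop := ∀ (sequence : String), Dom_calc_z_curve sequence → Spec_calc_z_curve sequence (calc_z_curve sequence)

-- ===== LEMMAS AND PROOFS =====
lemma calc_z_curve_step_eq (base : Char) (acc : List Int × List Int × List Int) :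
    calc_z_curve_step acc base =
      (acc.1 ++ [calc_z_curve_sign ("AG", "CT") base],
       acc.2.1 ++ [calc_z_curve_sign ("AC", "GT") base],
       acc.2.2 ++ [calc_z_curve_sign ("AT", "GC") base]) := by
  by_cases hA : base = 'A' <;> by_cases hT : base = 'T' <;> by_cases hG : base = 'G' <;>
    by_cases hC : base = 'C' <;> simp_all [calc_z_curve_step, calc_z_curve_sign]

lemma calc_z_curve_foldl (l : List Char) (acc : List Int × List Int × List Int) :
    l.foldl calc_z_curve_step acc =
      (acc.1 ++ l.map (calc_z_curve_sign ("AG", "CT")),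
       acc.2.1 ++ l.map (calc_z_curve_sign ("AC", "GT")),
       acc.2.2 ++ l.map (calc_z_curve_sign ("AT", "GC"))) := by
  induction l generalizing acc with
  | nil => simp
  | cons c cs ih => simp [List.foldl, ih, calc_z_curve_step_eq]

-- ===== VERDICT (by name: the statement is the Claim_ definition above) =====
theorem calc_z_curve_spec : Claim_equal_calc_z_curve := by
  intro s _
  unfold Spec_calc_z_curve calc_z_curve calc_z_curve_alt
  rw [calc_z_curve_foldl]
  simp
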